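-- pv_equiv track=rewrite | github.com/rsionnach/nthlayer-correlate | src/nthlayer_correlate/prometheus.py | blast_radius_services
-- ===== SOURCE A (Python) =====
-- def blast_radius_services(
--     trigger_service: str,
--     dependency_graph: dict[str, dict],
-- ) -> set[str]:
--     """Compute blast radius: trigger service + dependents (upstream consumers) + dependencies (downstream)."""
--     affected = {trigger_service}
--     # Walk dependents (who depends on the trigger service?)
--     to_visit = list(dependency_graph.get(trigger_service, {}).get("dependents", []))
--     while to_visit:
--         svc = to_visit.pop(0)
--         if svc not in affected:
--             affected.add(svc)
--             to_visit.extend(dependency_graph.get(svc, {}).get("dependents", []))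
--     # Also include dependencies (downstream services)
--     for dep in dependency_graph.get(trigger_service, {}).get("dependencies", []):
--         affected.add(dep)
--     return affected
-- ===== SOURCE B (Python) =====
-- def blast_radius_services(
--     trigger_service: str,
--     dependency_graph: dict[str, dict],
-- ) -> set[str]:
--     """Blast radius via an index-scanned discovery list: dedup at enqueue time,
--     each service enqueued at most once, no pop(0) shifting."""
--     order = [trigger_service]
--     seen = {trigger_service}
--     i = 0
--     while i < len(order):
--         for d in dependency_graph.get(order[i], {}).get("dependents", []):
--             if d not in seen:
--                 seen.add(d)
--                 order.append(d)
--         i += 1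
--     affected = set(order)
--     for dep in dependency_graph.get(trigger_service, {}).get("dependencies", []):
--         affected.add(dep)
--     return affected
-- ===== Notes on version B (the rewrite author's own statement) =====
-- stated objective: alternative
-- what changed: Replaces the pop(0) work queue that may hold one duplicate entry per edge (dedup at dequeue) with an index scan over the growing discovery list deduplicated at enqueue time, so each service is enqueued at most once and no list shifting occurs.
import Mathlib
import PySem

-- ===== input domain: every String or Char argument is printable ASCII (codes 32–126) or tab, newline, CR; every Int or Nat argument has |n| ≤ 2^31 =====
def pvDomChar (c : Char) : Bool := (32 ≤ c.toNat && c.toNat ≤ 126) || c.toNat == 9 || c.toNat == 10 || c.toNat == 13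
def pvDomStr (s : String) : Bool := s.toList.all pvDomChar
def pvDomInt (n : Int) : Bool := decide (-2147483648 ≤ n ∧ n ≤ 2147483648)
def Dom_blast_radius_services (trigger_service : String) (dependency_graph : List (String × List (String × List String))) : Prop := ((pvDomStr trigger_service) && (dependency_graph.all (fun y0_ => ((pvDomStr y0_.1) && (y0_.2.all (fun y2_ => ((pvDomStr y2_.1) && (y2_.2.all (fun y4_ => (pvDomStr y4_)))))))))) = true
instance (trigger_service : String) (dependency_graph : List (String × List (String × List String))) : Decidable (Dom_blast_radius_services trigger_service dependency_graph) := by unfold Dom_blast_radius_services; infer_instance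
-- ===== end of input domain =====

-- B replaces A's pop(0) work queue (dedup at dequeue) by an index scan over the growing
-- discovery list with dedup at enqueue; the returned set (and its insertion order) is identical.

-- dependency_graph.get(svc, {}).get(key, []) — first-match association-list lookup
def pvGetList (g : List (String × List (String × List String))) (svc : String) (key : String) : List String :=
  (((g.lookup svc).getD []).lookup key).getD []

-- all strings either traversal can ever enqueue: the keys plus every "dependents" entry
def pvUniverse (g : List (String × List (String × List String))) : List String :=
  g.map Prod.fst ++ g.flatMap (fun p => ((p.2.lookup "dependents")).getD [])

-- termination measure: universe elements not yet in the visited set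
def pvMeasF (g : List (String × List (String × List String))) (s : PySem.Set String) : Nat :=
  ((pvUniverse g).filter (fun x => !(PySem.Set.contains s x))).length

theorem pvContains_true {s : PySem.Set String} {x : String} (h : x ∈ s) :
    PySem.Set.contains s x = true := (PySem.Set.contains_iff s x).mpr h

theorem pvContains_false {s : PySem.Set String} {x : String} (h : x ∉ s) :
    PySem.Set.contains s x = false := by
  cases hc : PySem.Set.contains s x with
  | false => rfl
  | true => exact absurd ((PySem.Set.contains_iff s x).mp hc) h

theorem pvFilter_len_le {α : Type} (l : List α) (p q : α → Bool) (h : ∀ x ∈ l, q x = true → p x = true) :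
    (l.filter q).length ≤ (l.filter p).length := by
  induction l with
  | nil => simp
  | cons a tl ih =>
    have ih' := ih (fun x hx => h x (List.mem_cons_of_mem a hx))
    by_cases hq : q a = true
    · simp only [List.filter_cons, hq, h a (List.mem_cons_self) hq, if_true, List.length_cons]
      omega
    · rw [Bool.not_eq_true] at hq
      simp only [List.filter_cons, hq, Bool.false_eq_true, if_false]
      by_cases hp : p a = true
      · simp only [hp, if_true, List.length_cons]; omega
      · rw [Bool.not_eq_true] at hp
        simp only [hp, Bool.false_eq_true, if_false]; omega

theorem pvFilter_len_lt {α : Type} (l : List α) (p q : α → Bool) (h : ∀ x ∈ l, q x = true → p x = true)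
    (y : α) (hy : y ∈ l) (hpy : p y = true) (hqy : q y = false) :
    (l.filter q).length < (l.filter p).length := by
  induction l with
  | nil => simp at hy
  | cons a tl ih =>
    have hle := pvFilter_len_le tl p q (fun x hx => h x (List.mem_cons_of_mem a hx))
    rcases List.mem_cons.mp hy with rfl | hmem
    · simp only [List.filter_cons, hpy, hqy, Bool.false_eq_true, if_false, if_true, List.length_cons]
      omega
    · have ih' := ih (fun x hx => h x (List.mem_cons_of_mem a hx)) hmem
      by_cases hq : q a = true
      · simp only [List.filter_cons, hq, h a (List.mem_cons_self) hq, if_true, List.length_cons]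
        omega
      · rw [Bool.not_eq_true] at hq
        simp only [List.filter_cons, hq, Bool.false_eq_true, if_false]
        by_cases hp : p a = true
        · simp only [hp, if_true, List.length_cons]; omega
        · rw [Bool.not_eq_true] at hp
          simp only [hp, Bool.false_eq_true, if_false]; omega

theorem pvMeasF_le (g : List (String × List (String × List String))) (s s' : PySem.Set String)
    (hmono : ∀ x, x ∈ s → x ∈ s') : pvMeasF g s' ≤ pvMeasF g s := by
  apply pvFilter_len_le
  intro x _ hx
  rw [Bool.not_eq_true'] at hx ⊢
  by_cases hxs : x ∈ s
  · rw [pvContains_true (hmono x hxs)] at hx; simp at hx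
  · exact pvContains_false hxs

theorem pvMeasF_lt (g : List (String × List (String × List String))) (s s' : PySem.Set String)
    (hmono : ∀ x, x ∈ s → x ∈ s') (y : String) (hyU : y ∈ pvUniverse g)
    (hyo : y ∉ s) (hyn : y ∈ s') : pvMeasF g s' < pvMeasF g s := by
  refine pvFilter_len_lt _ _ _ ?_ y hyU ?_ ?_
  · intro x _ hx
    rw [Bool.not_eq_true'] at hx ⊢
    by_cases hxs : x ∈ s
    · rw [pvContains_true (hmono x hxs)] at hx; simp at hx
    · exact pvContains_false hxs
  · rw [Bool.not_eq_true']; exact pvContains_false hyo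
  · rw [Bool.not_eq_false']; exact pvContains_true hyn

theorem pvMem_univ_of_mem_deps (g : List (String × List (String × List String))) (svc y : String)
    (h : y ∈ pvGetList g svc "dependents") : y ∈ pvUniverse g := by
  induction g with
  | nil => simp [pvGetList] at h
  | cons hd tl ih =>
    simp only [pvGetList, List.lookup] at h
    by_cases hk : (svc == hd.1) = true
    · rw [hk] at h
      simp only [Option.getD_some] at h
      simp only [pvUniverse, List.map_cons, List.flatMap_cons, List.mem_append, List.mem_cons]
      tauto
    · rw [Bool.not_eq_true] at hk
      rw [hk] at h
      have := ih h
      simp only [pvUniverse, List.map_cons, List.flatMap_cons, List.mem_append, List.mem_cons] at this ⊢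
      tauto

theorem pvDeps_len_le (g : List (String × List (String × List String))) (svc : String) :
    (pvGetList g svc "dependents").length ≤ (pvUniverse g).length := by
  induction g with
  | nil => simp [pvGetList, pvUniverse]
  | cons hd tl ih =>
    simp only [pvGetList, List.lookup] at *
    by_cases hk : (svc == hd.1) = true
    · rw [hk]
      simp only [Option.getD_some, pvUniverse, List.map_cons, List.flatMap_cons,
        List.length_append, List.length_cons]
      omega
    · rw [Bool.not_eq_true] at hk
      rw [hk]
      simp only [pvUniverse, List.map_cons, List.flatMap_cons, List.length_append,
        List.length_cons] at ih ⊢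
      omega

theorem pvDeps_nil_of_not_key (g : List (String × List (String × List String))) (svc key : String)
    (h : svc ∉ g.map Prod.fst) : pvGetList g svc key = [] := by
  induction g with
  | nil => simp [pvGetList]
  | cons hd tl ih =>
    simp only [List.map_cons, List.mem_cons, not_or] at h
    have hk : (svc == hd.1) = false := by simp only [beq_eq_false_iff_ne]; exact h.1
    simp only [pvGetList, List.lookup, hk] at *
    exact ih h.2

-- ===== PORT A =====
-- while to_visit: svc = to_visit.pop(0); if svc not in affected: add it and extend the queue
def blastA_loop (g : List (String × List (String × List String))) (aff : PySem.Set String) (q : List String) : PySem.Set String :=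
  match q with
  | [] => aff
  | svc :: rest =>
    if PySem.Set.contains aff svc then blastA_loop g aff rest
    else blastA_loop g (PySem.Set.add aff svc) (rest ++ pvGetList g svc "dependents")
termination_by pvMeasF g aff * ((pvUniverse g).length + 1) + q.length
decreasing_by
  · simp only [List.length_cons]; omega
  · rename_i hna
    have hmono : ∀ x, x ∈ aff → x ∈ PySem.Set.add aff svc :=
      fun x hx => (PySem.Set.mem_add aff svc x).mpr (Or.inl hx)
    have hns : svc ∉ aff := fun hmem => hna (pvContains_true hmem)
    by_cases hU : svc ∈ pvUniverse g
    · have h1 : pvMeasF g (PySem.Set.add aff svc) < pvMeasF g aff :=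
        pvMeasF_lt g aff _ hmono svc hU hns ((PySem.Set.mem_add aff svc svc).mpr (Or.inr rfl))
      have h2 := pvDeps_len_le g svc
      simp only [List.length_append, List.length_cons]
      nlinarith
    · have hd : pvGetList g svc "dependents" = [] := by
        apply pvDeps_nil_of_not_key
        intro hk; exact hU (List.mem_append_left _ hk)
      have h1 : pvMeasF g (PySem.Set.add aff svc) ≤ pvMeasF g aff := pvMeasF_le g aff _ hmono
      simp only [hd, List.append_nil, List.length_cons]
      nlinarith

def blast_radius_services (trigger_service : String) (dependency_graph : List (String × List (String × List String))) : List String :=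
  let affected : PySem.Set String := PySem.Set.ofList [trigger_service]
  let to_visit := pvGetList dependency_graph trigger_service "dependents"
  let affected := blastA_loop dependency_graph affected to_visit
  (pvGetList dependency_graph trigger_service "dependencies").foldl
    (fun s dep => PySem.Set.add s dep) affected

-- ===== PORT B =====
-- the inner 'for d in …dependents: if d not in seen: seen.add(d); order.append(d)'
def pvEnq (seen : PySem.Set String) (xs : List String) : PySem.Set String × List String :=
  xs.foldl (fun sa d => if PySem.Set.contains sa.1 d then sa else (PySem.Set.add sa.1 d, sa.2 ++ [d])) (seen, [])

theorem pvEnq_acc (xs : List String) (s : PySem.Set String) (a : List String) :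
    xs.foldl (fun sa d => if PySem.Set.contains sa.1 d then sa else (PySem.Set.add sa.1 d, sa.2 ++ [d])) (s, a)
      = ((pvEnq s xs).1, a ++ (pvEnq s xs).2) := by
  induction xs generalizing s a with
  | nil => simp [pvEnq]
  | cons x tl ih =>
    simp only [pvEnq, List.foldl_cons, List.nil_append]
    by_cases hc : PySem.Set.contains s x = true
    · simp only [hc, if_true]
      exact ih s a
    · rw [Bool.not_eq_true] at hc
      simp only [hc, Bool.false_eq_true, if_false]
      rw [ih (PySem.Set.add s x) (a ++ [x]), ih (PySem.Set.add s x) [x]]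
      simp

theorem pvEnq_cons_mem (s : PySem.Set String) (x : String) (xs : List String)
    (h : PySem.Set.contains s x = true) : pvEnq s (x :: xs) = pvEnq s xs := by
  simp only [pvEnq, List.foldl_cons, h, if_true]

theorem pvEnq_cons_not_mem (s : PySem.Set String) (x : String) (xs : List String)
    (h : PySem.Set.contains s x = false) :
    pvEnq s (x :: xs) = ((pvEnq (PySem.Set.add s x) xs).1, x :: (pvEnq (PySem.Set.add s x) xs).2) := by
  simp only [pvEnq, List.foldl_cons, h, Bool.false_eq_true, if_false, List.nil_append]
  rw [pvEnq_acc xs (PySem.Set.add s x) [x]]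
  simp [pvEnq]

theorem pvEnq_fst (s : PySem.Set String) (xs : List String) :
    (pvEnq s xs).1 = s ++ (pvEnq s xs).2 := by
  induction xs generalizing s with
  | nil => simp [pvEnq]
  | cons x tl ih =>
    by_cases hc : PySem.Set.contains s x = true
    · rw [pvEnq_cons_mem s x tl hc]; simpa using ih s
    · rw [Bool.not_eq_true] at hc
      rw [pvEnq_cons_not_mem s x tl hc]
      have hadd : PySem.Set.add s x = s ++ [x] :=
        PySem.Set.add_of_not_mem (fun hm => by rw [pvContains_true hm] at hc; simp at hc)
      have h2 := ih (PySem.Set.add s x)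
      rw [h2, hadd]
      simp

theorem pvEnq_snd_mem (s : PySem.Set String) (xs : List String) (y : String)
    (h : y ∈ (pvEnq s xs).2) : y ∈ xs ∧ y ∉ s := by
  induction xs generalizing s with
  | nil => simp [pvEnq] at h
  | cons x tl ih =>
    by_cases hc : PySem.Set.contains s x = true
    · rw [pvEnq_cons_mem s x tl hc] at h
      have := ih s h
      exact ⟨List.mem_cons_of_mem x this.1, this.2⟩
    · rw [Bool.not_eq_true] at hc
      rw [pvEnq_cons_not_mem s x tl hc] at h
      rcases List.mem_cons.mp h with rfl | hmem
      · exact ⟨List.mem_cons_self, fun hm => by rw [pvContains_true hm] at hc; simp at hc⟩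
      · have := ih (PySem.Set.add s x) hmem
        refine ⟨List.mem_cons_of_mem x this.1, fun hm => this.2 ?_⟩
        exact (PySem.Set.mem_add s x y).mpr (Or.inl hm)

theorem pvEnq_snd_len (s : PySem.Set String) (xs : List String) :
    (pvEnq s xs).2.length ≤ xs.length := by
  induction xs generalizing s with
  | nil => simp [pvEnq]
  | cons x tl ih =>
    by_cases hc : PySem.Set.contains s x = true
    · rw [pvEnq_cons_mem s x tl hc]
      exact le_trans (ih s) (Nat.le_succ _)
    · rw [Bool.not_eq_true] at hc
      rw [pvEnq_cons_not_mem s x tl hc]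
      simpa using ih (PySem.Set.add s x)

-- 'while i < len(order)': seen carries the elements of order, pending = order[i:]
def blastB_loop (g : List (String × List (String × List String))) (seen : PySem.Set String) (pending : List String) : PySem.Set String :=
  match pending with
  | [] => seen
  | x :: rest =>
    let r := pvEnq seen (pvGetList g x "dependents")
    blastB_loop g r.1 (rest ++ r.2)
termination_by pvMeasF g seen * ((pvUniverse g).length + 1) + pending.length
decreasing_by
  cases hsnd : (pvEnq seen (pvGetList g x "dependents")).2 with
  | nil =>
    have h1 : (pvEnq seen (pvGetList g x "dependents")).1 = seen := by
      rw [pvEnq_fst, hsnd, List.append_nil]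
    simp only [h1, List.append_nil, List.length_cons]
    omega
  | cons y ys =>
    have hy : y ∈ (pvEnq seen (pvGetList g x "dependents")).2 := by
      rw [hsnd]; exact List.mem_cons_self
    have hmem := pvEnq_snd_mem seen _ y hy
    have hyU : y ∈ pvUniverse g := pvMem_univ_of_mem_deps g x y hmem.1
    have hmono : ∀ z, z ∈ seen → z ∈ (pvEnq seen (pvGetList g x "dependents")).1 := by
      intro z hz; rw [pvEnq_fst]; exact List.mem_append_left _ hz
    have hyn : y ∈ (pvEnq seen (pvGetList g x "dependents")).1 := by
      rw [pvEnq_fst]; exact List.mem_append_right _ hy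
    have h1 : pvMeasF g (pvEnq seen (pvGetList g x "dependents")).1 < pvMeasF g seen :=
      pvMeasF_lt g seen _ hmono y hyU hmem.2 hyn
    have h2 : (pvEnq seen (pvGetList g x "dependents")).2.length ≤ (pvUniverse g).length :=
      le_trans (pvEnq_snd_len seen _) (pvDeps_len_le g x)
    rw [hsnd] at h2
    have h3 := Nat.mul_le_mul_right ((pvUniverse g).length + 1) (Nat.succ_le_of_lt h1)
    rw [Nat.succ_mul] at h3
    have h5 : ys.length + 1 ≤ (pvUniverse g).length := by
      simp only [List.length_cons] at h2; omega
    simp only [List.length_append, List.length_cons]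
    linarith

def blast_radius_services_alt (trigger_service : String) (dependency_graph : List (String × List (String × List String))) : List String :=
  let order := blastB_loop dependency_graph (PySem.Set.ofList [trigger_service]) [trigger_service]
  let affected : PySem.Set String := PySem.Set.ofList order
  (pvGetList dependency_graph trigger_service "dependencies").foldl
    (fun s dep => PySem.Set.add s dep) affected

-- ===== PRECONDITION & SPEC =====
def Spec_blast_radius_services (trigger_service : String) (dependency_graph : List (String × List (String × List String))) (out : List String) : Prop := out = blast_radius_services_alt trigger_service dependency_graph
instance (trigger_service : String) (dependency_graph : List (String × List (String × List String))) (out : List String) : Decidable (Spec_blast_radius_services trigger_service dependency_graph out) := by unfold Spec_blast_radius_services; infer_instance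

-- ===== CLAIM (what is proved, stated in full; the proofs are below) =====
def Claim_equal_blast_radius_services : Prop := ∀ (trigger_service : String) (dependency_graph : List (String × List (String × List String))), Dom_blast_radius_services trigger_service dependency_graph → Spec_blast_radius_services trigger_service dependency_graph (blast_radius_services trigger_service dependency_graph)

-- ===== LEMMAS AND PROOFS =====

theorem pvEnq_append (s : PySem.Set String) (xs ys : List String) :
    pvEnq s (xs ++ ys)
      = ((pvEnq (pvEnq s xs).1 ys).1, (pvEnq s xs).2 ++ (pvEnq (pvEnq s xs).1 ys).2) := by
  have h1 : pvEnq s (xs ++ ys)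
      = ys.foldl (fun sa d => if PySem.Set.contains sa.1 d then sa else (PySem.Set.add sa.1 d, sa.2 ++ [d])) ((pvEnq s xs).1, (pvEnq s xs).2) := by
    simp only [pvEnq, List.foldl_append]
  rw [h1, pvEnq_acc ys (pvEnq s xs).1 (pvEnq s xs).2]

-- A's queue state maps to B's (seen, pending) state through pvEnq: dedup at dequeue ≡ dedup at enqueue
theorem pvLoopAB (g : List (String × List (String × List String))) (aff : PySem.Set String) (q : List String) :
    blastA_loop g aff q = blastB_loop g (pvEnq aff q).1 (pvEnq aff q).2 := by
  induction aff, q using blastA_loop.induct g with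
  | case1 aff => simp [blastA_loop, blastB_loop, pvEnq]
  | case2 aff svc rest hc ih =>
    rw [blastA_loop, if_pos hc, pvEnq_cons_mem aff svc rest hc]
    exact ih
  | case3 aff svc rest hc ih =>
    rw [Bool.not_eq_true] at hc
    rw [blastA_loop, hc]
    simp only [Bool.false_eq_true, if_false]
    rw [pvEnq_cons_not_mem aff svc rest hc]
    rw [blastB_loop]
    rw [ih]
    rw [pvEnq_append (PySem.Set.add aff svc) rest (pvGetList g svc "dependents")]

theorem pvEnq_fst_nodup (s : PySem.Set String) (xs : List String) (h : s.Nodup) :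
    (pvEnq s xs).1.Nodup := by
  induction xs generalizing s with
  | nil => exact h
  | cons x tl ih =>
    by_cases hc : PySem.Set.contains s x = true
    · rw [pvEnq_cons_mem s x tl hc]; exact ih s h
    · rw [Bool.not_eq_true] at hc
      rw [pvEnq_cons_not_mem s x tl hc]
      exact ih (PySem.Set.add s x) (PySem.Set.nodup_add s x h)

theorem pvBlastB_nodup (g : List (String × List (String × List String))) (seen : PySem.Set String) (pending : List String) :
    seen.Nodup → (blastB_loop g seen pending).Nodup := by
  induction seen, pending using blastB_loop.induct g with
  | case1 seen => intro h; rw [blastB_loop]; exact h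
  | case2 seen x rest r ih =>
    intro h
    rw [blastB_loop]
    exact ih (pvEnq_fst_nodup seen _ h)

-- ===== VERDICT (by name: the statement is the Claim_ definition above) =====
theorem blast_radius_services_spec : Claim_equal_blast_radius_services := by
  intro t g _
  unfold Spec_blast_radius_services
  show (pvGetList g t "dependencies").foldl (fun s dep => PySem.Set.add s dep)
      (blastA_loop g (PySem.Set.ofList [t]) (pvGetList g t "dependents"))
    = (pvGetList g t "dependencies").foldl (fun s dep => PySem.Set.add s dep)
      (PySem.Set.ofList (blastB_loop g (PySem.Set.ofList [t]) [t]))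
  have hB : blastB_loop g (PySem.Set.ofList [t]) [t]
      = blastA_loop g (PySem.Set.ofList [t]) (pvGetList g t "dependents") := by
    rw [blastB_loop]
    simp only [List.nil_append]
    rw [← pvLoopAB g (PySem.Set.ofList [t]) (pvGetList g t "dependents")]
  have hnd : (blastA_loop g (PySem.Set.ofList [t]) (pvGetList g t "dependents")).Nodup :=
    hB ▸ pvBlastB_nodup g (PySem.Set.ofList [t]) [t] (by simp [PySem.Set.ofList])
  rw [hB, PySem.Set.ofList_eq_self_of_nodup _ hnd]
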